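-- pv_equiv track=rewrite | github.com/xulb/aaserver | aaserver.py | q2strip
-- ===== SOURCE A (Python) =====
-- def q2strip(s):
--     """
--     Strip out color escapes from Quake 2 strings
--     """
--     ret = ''
--     in_esc = False
--     for c in s:
--         if (in_esc):
--             in_esc = False
--             continue
--         else:
--             if (c == '^'):
--                 in_esc = True
--                 continue
--             else:
--                 ret += c
--     return ret
-- ===== SOURCE B (Python) =====
-- def q2strip(s):
--     """
--     Strip out color escapes from Quake 2 strings
--     """
--     parts = []
--     i = 0
--     while True:
--         j = s.find('^', i)
--         if j == -1:
--             parts.append(s[i:])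
--             return ''.join(parts)
--         parts.append(s[i:j])
--         i = j + 2
-- ===== Notes on version B (the rewrite author's own statement) =====
-- stated objective: faster
-- what changed: Replaced the per-character state machine carrying an in_esc flag and a char-by-char growing string with a loop that jumps between carets via str.find and copies whole caret-free slices, joined at the end.
import Mathlib
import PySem

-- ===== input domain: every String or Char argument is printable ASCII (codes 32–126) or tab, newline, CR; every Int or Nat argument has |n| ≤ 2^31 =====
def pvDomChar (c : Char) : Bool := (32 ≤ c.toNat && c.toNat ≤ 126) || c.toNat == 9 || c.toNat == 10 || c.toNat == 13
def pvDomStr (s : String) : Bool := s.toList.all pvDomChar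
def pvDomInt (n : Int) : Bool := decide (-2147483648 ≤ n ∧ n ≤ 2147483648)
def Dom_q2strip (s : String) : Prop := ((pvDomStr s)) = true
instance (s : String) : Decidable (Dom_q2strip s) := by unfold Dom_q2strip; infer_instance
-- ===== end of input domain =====

-- B replaces A's per-character state machine with s.find('^', i) jumps copying caret-free chunks; faster in a timing run.
-- ===== PORT A =====
-- A: loop over the characters with state (ret, in_esc); ret += c ported as list append.
def q2stripStep (st : List Char × Bool) (c : Char) : List Char × Bool :=
  if st.2 then (st.1, false)
  else if c = '^' then (st.1, true)
  else (st.1 ++ [c], false)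

def q2strip (s : String) : String :=
  String.ofList (s.toList.foldl q2stripStep ([], false)).1

-- ===== PORT B =====
-- Termination fact for the loop: a successful find lands at an index ≥ i inside the list.
theorem q2AltFind_lt (cs : List Char) (i : Nat)
    (hj : ¬ PySem.Chars.findFrom cs ['^'] (i : Int) none = -1) :
    cs.length - ((PySem.Chars.findFrom cs ['^'] (i : Int) none).toNat + 2) < cs.length - i := by
  by_cases hi : i ≤ cs.length
  · obtain ⟨h1, h2, _⟩ := PySem.Chars.findFrom_natCast_spec cs ['^'] i hi hj
    have hlt : (PySem.Chars.findFrom cs ['^'] (i : Int) none).toNat < cs.length := by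
      rcases h2 with ⟨t, ht⟩
      have := congrArg List.length ht
      simp at this
      omega
    omega
  · exfalso
    apply hj
    simp [PySem.Chars.findFrom, show ¬((i:Int) < 0) from by omega]
    intro h1
    omega

-- B: while loop — find the next caret from i, emit the caret-free slice s[i:j], jump to j+2; ''.join = flatten.
def q2AltLoop (cs : List Char) (parts : List (List Char)) (i : Nat) : List (List Char) :=
  let j : Int := PySem.Chars.findFrom cs ['^'] (i : Int) none
  if hj : j = -1 then parts ++ [PySem.List.slice cs (some (i : Int)) none]
  else q2AltLoop cs (parts ++ [PySem.List.slice cs (some (i : Int)) (some j)]) (j.toNat + 2)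
termination_by cs.length - i
decreasing_by exact q2AltFind_lt cs i hj

def q2strip_alt (s : String) : String :=
  String.ofList (q2AltLoop s.toList [] 0).flatten

-- ===== PRECONDITION & SPEC =====
def Spec_q2strip (s : String) (out : String) : Prop := out = q2strip_alt s
instance (s : String) (out : String) : Decidable (Spec_q2strip s out) := by unfold Spec_q2strip; infer_instance

-- ===== CLAIM (what is proved, stated in full; the proofs are below) =====
def Claim_equal_q2strip : Prop := ∀ (s : String), Dom_q2strip s → Spec_q2strip s (q2strip s)

-- ===== LEMMAS AND PROOFS =====
-- Common characterisation: drop each '^' together with the character after it.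
def q2stripGo : List Char → List Char
  | [] => []
  | c :: rest =>
    if c = '^' then q2stripGo (rest.drop 1)
    else c :: q2stripGo rest
termination_by l => l.length
decreasing_by
  · exact Nat.lt_succ_of_le (by simp)
  · simp

-- A's fold equals q2stripGo.
theorem q2strip_fold_eq (l : List Char) : ∀ acc : List Char,
    (l.foldl q2stripStep (acc, false)).1 = acc ++ q2stripGo l := by
  induction l using q2stripGo.induct with
  | case1 => intro acc; simp [q2stripGo]
  | case2 rest ih =>
    intro acc
    cases rest with
    | nil => simp [q2stripStep, q2stripGo]
    | cons d r =>
      simp only [List.foldl_cons, q2stripStep, Bool.false_eq_true, if_false, if_true]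
      rw [q2stripGo]
      simp only [List.drop_succ_cons, List.drop_zero]
      have := ih acc
      simpa using this
  | case3 c rest hc ih =>
    intro acc
    simp only [List.foldl_cons, q2stripStep, Bool.false_eq_true, if_false, if_neg hc]
    rw [q2stripGo]
    simp only [if_neg hc]
    rw [ih (acc ++ [c])]
    simp

-- q2stripGo passes a caret-free prefix through unchanged.
theorem q2stripGo_append (p : List Char) (l : List Char) (hp : '^' ∉ p) :
    q2stripGo (p ++ l) = p ++ q2stripGo l := by
  induction p with
  | nil => simp
  | cons c r ih =>
    have hc : c ≠ '^' := by intro h; exact hp (h ▸ List.mem_cons_self)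
    rw [List.cons_append, q2stripGo]
    simp only [if_neg hc]
    rw [ih (fun h => hp (List.mem_cons_of_mem _ h))]
    simp

theorem q2stripGo_no_caret (l : List Char) (h : '^' ∉ l) : q2stripGo l = l := by
  have := q2stripGo_append l [] h
  simpa [q2stripGo] using this

-- The caret-free chunk s[i:j] and the split of the tail at the found caret.
theorem q2strip_chunk (cs : List Char) (i : Nat) (hi : i ≤ cs.length)
    (hj : ¬ PySem.Chars.findFrom cs ['^'] (i : Int) none = -1) :
    q2stripGo (cs.drop i) =
      (cs.drop i).take ((PySem.Chars.findFrom cs ['^'] (i : Int) none).toNat - i) ++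
        q2stripGo (cs.drop ((PySem.Chars.findFrom cs ['^'] (i : Int) none).toNat + 2)) := by
  obtain ⟨h1, h2, h3⟩ := PySem.Chars.findFrom_natCast_spec cs ['^'] i hi hj
  set j := PySem.Chars.findFrom cs ['^'] (i : Int) none with hjdef
  have hij : i ≤ j.toNat := by omega
  have hjlen : j.toNat < cs.length := by
    rcases h2 with ⟨t, ht⟩
    have := congrArg List.length ht
    simp at this
    omega
  set p := (cs.drop i).take (j.toNat - i) with hpdef
  have hsplit : cs.drop i = p ++ cs.drop j.toNat := by
    have := List.take_append_drop (j.toNat - i) (cs.drop i)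
    rw [List.drop_drop, show i + (j.toNat - i) = j.toNat by omega] at this
    exact this.symm
  have hp : '^' ∉ p := by
    intro hmem
    obtain ⟨k, hk, hck⟩ := List.getElem_of_mem hmem
    have hklt : k < j.toNat - i := by
      have := hk
      simp [hpdef] at this
      omega
    have hcs : cs[i + k]'(by omega) = '^' := by
      have : p[k] = (cs.drop i)[k]'(by simp; omega) := by
        simp [hpdef]
      rw [this] at hck
      simpa [List.getElem_drop] using hck
    apply h3 (i + k) (by omega) (by omega)
    refine ⟨cs.drop (i + k + 1), ?_⟩
    conv_rhs => rw [List.drop_eq_getElem_cons (show i + k < cs.length by omega)]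
    simp [hcs]
  have hcaret : cs.drop j.toNat = '^' :: cs.drop (j.toNat + 1) := by
    rcases h2 with ⟨t, ht⟩
    rw [List.drop_eq_getElem_cons hjlen] at ht ⊢
    obtain ⟨h4, h5⟩ := List.cons.inj ht
    rw [← h4]
  rw [hsplit, q2stripGo_append _ _ hp]
  congr 1
  rw [hcaret, q2stripGo]
  simp

-- B's loop invariant.
theorem q2AltLoop_eq (cs : List Char) (parts : List (List Char)) (i : Nat) :
    (q2AltLoop cs parts i).flatten = parts.flatten ++ q2stripGo (cs.drop i) := by
  induction parts, i using q2AltLoop.induct cs with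
  | case1 parts i j hj =>
    rw [q2AltLoop]
    rw [dif_pos hj]
    rw [PySem.List.slice_from_natCast]
    have hnc : '^' ∉ cs.drop i := by
      by_cases hi : i ≤ cs.length
      · intro hmem
        rw [PySem.Chars.findFrom_natCast_eq_neg_one_iff cs ['^'] i hi] at hj
        obtain ⟨u, v, huv⟩ := List.append_of_mem hmem
        exact hj ⟨u, v, by rw [huv]; simp⟩
      · intro hmem
        rw [List.drop_eq_nil_of_le (by omega)] at hmem
        exact absurd hmem (List.not_mem_nil)
    rw [q2stripGo_no_caret _ hnc]
    simp
  | case2 parts i j hj ih =>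
    rw [q2AltLoop]
    rw [dif_neg hj]
    rw [ih]
    have hi : i ≤ cs.length := by
      by_contra hi
      exact hj (by
        show PySem.Chars.findFrom cs ['^'] (i : Int) none = -1
        simp [PySem.Chars.findFrom, show ¬((i:Int) < 0) from by omega]
        intro h1
        omega)
    have h0j : (0:Int) ≤ PySem.Chars.findFrom cs ['^'] (i : Int) none := by
      have := (PySem.Chars.findFrom_natCast_spec cs ['^'] i hi hj).1
      omega
    have hslice : PySem.List.slice cs (some (i : Int)) (some (PySem.Chars.findFrom cs ['^'] (i : Int) none)) =
        (cs.drop i).take ((PySem.Chars.findFrom cs ['^'] (i : Int) none).toNat - i) := by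
      rw [show PySem.Chars.findFrom cs ['^'] (i : Int) none = ((PySem.Chars.findFrom cs ['^'] (i : Int) none).toNat : Int) by omega,
        PySem.List.slice_natCast]
      simp
      omega
    rw [hslice, q2strip_chunk cs i hi hj]
    simp
    rfl

-- ===== VERDICT =====
theorem q2strip_spec : Claim_equal_q2strip := by
  intro s _
  unfold Spec_q2strip q2strip q2strip_alt
  rw [q2strip_fold_eq, q2AltLoop_eq]
  simp
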